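-- pv_equiv track=rewrite | github.com/Wulfic/Cicada3301 | tools/page1_attack.py | tokens_to_ascii_stream
-- ===== SOURCE A (Python) =====
-- from typing import Iterable, List
--
-- TOKEN_TO_CHAR = {
-- 	"F": "F",
-- 	"U": "U",
-- 	"TH": "T",
-- 	"O": "O",
-- 	"R": "R",
-- 	"C": "C",
-- 	"G": "G",
-- 	"W": "W",
-- 	"H": "H",
-- 	"N": "N",
-- 	"I": "I",
-- 	"J": "J",
-- 	"EO": "E",
-- 	"P": "P",
-- 	"X": "X",
-- 	"S": "S",
-- 	"T": "T",
-- 	"B": "B",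
-- 	"E": "E",
-- 	"M": "M",
-- 	"L": "L",
-- 	"NG": "N",
-- 	"OE": "O",
-- 	"D": "D",
-- 	"A": "A",
-- 	"AE": "A",
-- 	"Y": "Y",
-- 	"IA": "I",
-- 	"EA": "E",
-- }
--
-- def tokens_to_ascii_stream(rendered: str) -> str:
-- 	"""Convert rendered rune-token text to a compact A-Z stream.
--
-- 	We map multi-letter rune tokens like TH/EO/NG/... down to single characters.
-- 	This reduces scoring artifacts from digraph tokens.
-- 	"""
-- 	out: List[str] = []
-- 	i = 0
-- 	while i < len(rendered):
-- 		ch = rendered[i]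
-- 		if not ch.isalpha():
-- 			i += 1
-- 			continue
--
-- 		if i + 1 < len(rendered):
-- 			two = rendered[i : i + 2].upper()
-- 			if two in TOKEN_TO_CHAR:
-- 				out.append(TOKEN_TO_CHAR[two])
-- 				i += 2
-- 				continue
--
-- 		one = ch.upper()
-- 		if one in TOKEN_TO_CHAR:
-- 			out.append(TOKEN_TO_CHAR[one])
-- 		i += 1
--
-- 	return "".join(out)
-- ===== SOURCE B (Python) =====
-- DIGRAPH = {"TH": "T", "EO": "E", "NG": "N", "OE": "O", "AE": "A", "IA": "I", "EA": "E"}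
-- SINGLES = "ABCDEFGHIJLMNOPRSTUWXY"
--
-- def tokens_to_ascii_stream(rendered: str) -> str:
-- 	"""One-pass state machine: carry at most one pending letter; pair it with the
-- 	next letter when the two form a digraph token, otherwise flush it alone."""
-- 	out = []
-- 	pending = None  # uppercase letter waiting for a possible digraph partner
-- 	for c in rendered:
-- 		if not c.isalpha():
-- 			if pending is not None and pending in SINGLES:
-- 				out.append(pending)
-- 			pending = None
-- 			continue
-- 		u = c.upper()
-- 		if pending is None:
-- 			pending = u
-- 		elif pending + u in DIGRAPH:
-- 			out.append(DIGRAPH[pending + u])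
-- 			pending = None
-- 		else:
-- 			if pending in SINGLES:
-- 				out.append(pending)
-- 			pending = u
-- 	if pending is not None and pending in SINGLES:
-- 		out.append(pending)
-- 	return "".join(out)
-- ===== Notes on version B (the rewrite author's own statement) =====
-- stated objective: alternative
-- what changed: Replaced A's index-based while loop that re-slices the string and probes one 29-key token dict per position with a single left fold (state machine) carrying at most one pending uppercase letter, pairing it with the next letter via a 7-key digraph table or flushing it via a SINGLES membership test.
import Mathlib
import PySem

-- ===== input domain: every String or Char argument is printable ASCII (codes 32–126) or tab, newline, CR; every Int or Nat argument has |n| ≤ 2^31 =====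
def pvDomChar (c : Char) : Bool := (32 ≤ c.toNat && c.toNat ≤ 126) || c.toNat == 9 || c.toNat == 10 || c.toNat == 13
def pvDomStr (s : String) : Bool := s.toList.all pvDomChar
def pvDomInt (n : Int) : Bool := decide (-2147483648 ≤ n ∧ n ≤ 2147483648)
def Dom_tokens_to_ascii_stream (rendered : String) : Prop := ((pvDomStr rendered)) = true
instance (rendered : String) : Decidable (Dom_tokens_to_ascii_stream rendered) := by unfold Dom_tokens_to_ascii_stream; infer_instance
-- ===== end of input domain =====

-- B replaces A's index-and-slice while-loop by a one-pass state machine (a fold carrying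
-- at most one pending letter); objective: alternative decomposition, same O(n) cost.

-- ===== PORT A =====
def TOKEN_TO_CHAR : PySem.Dict String String := PySem.Dict.mk
  [("F","F"),("U","U"),("TH","T"),("O","O"),("R","R"),("C","C"),("G","G"),("W","W"),
   ("H","H"),("N","N"),("I","I"),("J","J"),("EO","E"),("P","P"),("X","X"),("S","S"),
   ("T","T"),("B","B"),("E","E"),("M","M"),("L","L"),("NG","N"),("OE","O"),("D","D"),
   ("A","A"),("AE","A"),("Y","Y"),("IA","I"),("EA","E")]

-- A's single-letter step: `one = ch.upper(); if one in TOKEN_TO_CHAR: out.append(...)`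
def pvSingleA (c : Char) : List String :=
  match TOKEN_TO_CHAR.get? (String.ofList (PySem.Chars.upper [c])) with
  | some t => [t]
  | none => []

-- A's while-loop over the remaining characters (index i ↦ the suffix from i).
def pvLoopA : List Char → List String
  | [] => []
  | [c] =>
    if PySem.Chars.isalpha c = false then []
    else pvSingleA c
  | c :: d :: rest =>
    if PySem.Chars.isalpha c = false then pvLoopA (d :: rest)
    else
      -- two = rendered[i:i+2].upper(); digraph hit consumes both characters
      match TOKEN_TO_CHAR.get? (String.ofList (PySem.Chars.upper [c, d])) with
      | some t => t :: pvLoopA rest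
      | none => pvSingleA c ++ pvLoopA (d :: rest)

def tokens_to_ascii_stream (rendered : String) : String :=
  PySem.Str.join "" (pvLoopA rendered.toList)

-- ===== PORT B =====
def DIGRAPH : PySem.Dict String String := PySem.Dict.mk
  [("TH","T"),("EO","E"),("NG","N"),("OE","O"),("AE","A"),("IA","I"),("EA","E")]

def SINGLES : String := "ABCDEFGHIJLMNOPRSTUWXY"

-- Source B's loop body; `pending` is the uppercase letter waiting for a digraph partner.
-- (`pending in SINGLES` for a 1-char string is character membership: SINGLES.toList.contains;
--  `pending + u` is the 2-character string String.ofList [p, u] — both exact.)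
def pvStepB (st : List String × Option Char) (c : Char) : List String × Option Char :=
  if PySem.Chars.isalpha c = false then
    match st.2 with
    | some p => (if SINGLES.toList.contains p then st.1 ++ [String.ofList [p]] else st.1, none)
    | none => (st.1, none)
  else
    let u := PySem.Chars.upperChar c
    match st.2 with
    | none => (st.1, some u)
    | some p =>
      match DIGRAPH.get? (String.ofList [p, u]) with
      | some t => (st.1 ++ [t], none)
      | none => (if SINGLES.toList.contains p then st.1 ++ [String.ofList [p]] else st.1, some u)

-- Source B's trailing flush after the loop.
def pvFinishB (st : List String × Option Char) : List String :=
  match st.2 with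
  | some p => if SINGLES.toList.contains p then st.1 ++ [String.ofList [p]] else st.1
  | none => st.1

def tokens_to_ascii_stream_alt (rendered : String) : String :=
  PySem.Str.join "" (pvFinishB (rendered.toList.foldl pvStepB ([], none)))

-- ===== PRECONDITION & SPEC =====
def Spec_tokens_to_ascii_stream (rendered : String) (out : String) : Prop := out = tokens_to_ascii_stream_alt rendered
instance (rendered : String) (out : String) : Decidable (Spec_tokens_to_ascii_stream rendered out) := by unfold Spec_tokens_to_ascii_stream; infer_instance

-- ===== CLAIM (what is proved, stated in full; the proofs are below) =====
def Claim_equal_tokens_to_ascii_stream : Prop := ∀ (rendered : String), Dom_tokens_to_ascii_stream rendered → Spec_tokens_to_ascii_stream rendered (tokens_to_ascii_stream rendered)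

-- ===== LEMMAS AND PROOFS =====

-- B's flush of a pending letter, as a list.
def pvFlushL (p : Char) : List String :=
  if SINGLES.toList.contains p then [String.ofList [p]] else []

-- What B still owes when a letter p is pending and cs remains (A's view from p's position).
def pvH (p : Char) : List Char → List String
  | [] => pvFlushL p
  | d :: rest =>
    match DIGRAPH.get? (String.ofList [p, PySem.Chars.upperChar d]) with
    | some t => t :: pvLoopA rest
    | none => pvFlushL p ++ pvLoopA (d :: rest)

def pvG : Option Char → List Char → List String
  | none, cs => pvLoopA cs
  | some p, cs => pvH p cs

theorem pv_beq_ofList_eq (s : String) (l : List Char) : (s == String.ofList l) = (s.toList == l) := by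
  have h2 : (s = String.ofList l) ↔ (s.toList = l) := by
    constructor
    · intro h; rw [h, String.toList_ofList]
    · intro h; rw [← h, String.ofList_toList]
  simp [h2]

theorem pv_upperChar_of_not_alpha (c : Char) (h : PySem.Chars.isalpha c = false) :
    PySem.Chars.upperChar c = c := by
  simp only [PySem.Chars.isalpha, Bool.or_eq_false_iff] at h
  simp [PySem.Chars.upperChar, h.2]

-- A non-letter can never be the second character of a digraph key.
theorem pv_dig_none (p u : Char) (h : PySem.Chars.isalpha u = false) :
    DIGRAPH.get? (String.ofList [p, u]) = none := by
  have hu : ∀ d : Char, PySem.Chars.isalpha d = true → (d == u) = false := by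
    intro d hd
    simp only [beq_eq_false_iff_ne, ne_eq]
    intro he; rw [← he, hd] at h; cases h
  simp only [DIGRAPH, PySem.Dict.get?, List.find?, pv_beq_ofList_eq,
    show "TH".toList = ['T','H'] from by decide, show "EO".toList = ['E','O'] from by decide,
    show "NG".toList = ['N','G'] from by decide, show "OE".toList = ['O','E'] from by decide,
    show "AE".toList = ['A','E'] from by decide, show "IA".toList = ['I','A'] from by decide,
    show "EA".toList = ['E','A'] from by decide]
  simp [hu 'H' (by decide), hu 'O' (by decide), hu 'G' (by decide),
        hu 'E' (by decide), hu 'A' (by decide)]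

-- On 2-character keys A's full table and B's digraph table agree.
theorem pv_two_get (p u : Char) :
    TOKEN_TO_CHAR.get? (String.ofList [p, u]) = DIGRAPH.get? (String.ofList [p, u]) := by
  simp [TOKEN_TO_CHAR, DIGRAPH, PySem.Dict.get?, List.find?, pv_beq_ofList_eq]

-- On 1-character keys A's table lookup is B's SINGLES membership (each key maps to itself).
set_option maxRecDepth 8192 in
theorem pv_single_get (p : Char) :
    TOKEN_TO_CHAR.get? (String.ofList [p]) =
      (if SINGLES.toList.contains p then some (String.ofList [p]) else none) := by
  by_cases hF : p = 'F'; · subst hF; decide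
  by_cases hU : p = 'U'; · subst hU; decide
  by_cases hO : p = 'O'; · subst hO; decide
  by_cases hR : p = 'R'; · subst hR; decide
  by_cases hC : p = 'C'; · subst hC; decide
  by_cases hG : p = 'G'; · subst hG; decide
  by_cases hW : p = 'W'; · subst hW; decide
  by_cases hH : p = 'H'; · subst hH; decide
  by_cases hN : p = 'N'; · subst hN; decide
  by_cases hI : p = 'I'; · subst hI; decide
  by_cases hJ : p = 'J'; · subst hJ; decide
  by_cases hP : p = 'P'; · subst hP; decide
  by_cases hX : p = 'X'; · subst hX; decide
  by_cases hS : p = 'S'; · subst hS; decide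
  by_cases hT : p = 'T'; · subst hT; decide
  by_cases hB : p = 'B'; · subst hB; decide
  by_cases hE : p = 'E'; · subst hE; decide
  by_cases hM : p = 'M'; · subst hM; decide
  by_cases hL : p = 'L'; · subst hL; decide
  by_cases hD : p = 'D'; · subst hD; decide
  by_cases hA : p = 'A'; · subst hA; decide
  by_cases hY : p = 'Y'; · subst hY; decide
  have f : ∀ q : Char, ¬ p = q → (q == p) = false := fun q h => beq_eq_false_iff_ne.mpr (Ne.symm h)
  have g : ∀ q : Char, ¬ p = q → (p == q) = false := fun q h => beq_eq_false_iff_ne.mpr h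
  have hc : SINGLES.toList.contains p = false := by
    simp only [SINGLES, show "ABCDEFGHIJLMNOPRSTUWXY".toList =
      ['A','B','C','D','E','F','G','H','I','J','L','M','N','O','P','R','S','T','U','W','X','Y']
      from by decide, List.contains_cons, List.contains_nil,
      g 'F' hF, g 'U' hU, g 'O' hO, g 'R' hR, g 'C' hC, g 'G' hG, g 'W' hW, g 'H' hH, g 'N' hN,
      g 'I' hI, g 'J' hJ, g 'P' hP, g 'X' hX, g 'S' hS, g 'T' hT, g 'B' hB, g 'E' hE, g 'M' hM,
      g 'L' hL, g 'D' hD, g 'A' hA, g 'Y' hY, Bool.or_self]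
  rw [hc]
  simp only [TOKEN_TO_CHAR, PySem.Dict.get?, List.find?, pv_beq_ofList_eq,
    show "F".toList = ['F'] from by decide, show "U".toList = ['U'] from by decide,
    show "TH".toList = ['T','H'] from by decide, show "O".toList = ['O'] from by decide,
    show "R".toList = ['R'] from by decide, show "C".toList = ['C'] from by decide,
    show "G".toList = ['G'] from by decide, show "W".toList = ['W'] from by decide,
    show "H".toList = ['H'] from by decide, show "N".toList = ['N'] from by decide,
    show "I".toList = ['I'] from by decide, show "J".toList = ['J'] from by decide,
    show "EO".toList = ['E','O'] from by decide, show "P".toList = ['P'] from by decide,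
    show "X".toList = ['X'] from by decide, show "S".toList = ['S'] from by decide,
    show "T".toList = ['T'] from by decide, show "B".toList = ['B'] from by decide,
    show "E".toList = ['E'] from by decide, show "M".toList = ['M'] from by decide,
    show "L".toList = ['L'] from by decide, show "NG".toList = ['N','G'] from by decide,
    show "OE".toList = ['O','E'] from by decide, show "D".toList = ['D'] from by decide,
    show "A".toList = ['A'] from by decide, show "AE".toList = ['A','E'] from by decide,
    show "Y".toList = ['Y'] from by decide, show "IA".toList = ['I','A'] from by decide,
    show "EA".toList = ['E','A'] from by decide,
    List.cons_beq_cons, List.beq_nil_eq, List.isEmpty_cons, Bool.and_false, BEq.rfl, Bool.and_true,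
    f 'F' hF, f 'U' hU, f 'O' hO, f 'R' hR, f 'C' hC, f 'G' hG, f 'W' hW, f 'H' hH, f 'N' hN,
    f 'I' hI, f 'J' hJ, f 'P' hP, f 'X' hX, f 'S' hS, f 'T' hT, f 'B' hB, f 'E' hE, f 'M' hM,
    f 'L' hL, f 'D' hD, f 'A' hA, f 'Y' hY]
  simp

-- A's single-letter step is B's flush of the uppercased letter.
theorem pv_singleA_eq_flush (c : Char) : pvSingleA c = pvFlushL (PySem.Chars.upperChar c) := by
  simp only [pvSingleA, PySem.Chars.upper, List.map, pv_single_get, pvFlushL]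
  by_cases hc : PySem.Chars.upperChar c ∈ SINGLES.toList <;> simp [hc]

-- A's loop at a letter d equals B's owed work with pending = upper d.
theorem pv_loopA_alpha (d : Char) (hd : PySem.Chars.isalpha d = true) (cs : List Char) :
    pvLoopA (d :: cs) = pvH (PySem.Chars.upperChar d) cs := by
  cases cs with
  | nil => simp [pvLoopA, hd, pvH, pv_singleA_eq_flush]
  | cons e rest =>
    simp only [pvLoopA, hd, Bool.true_eq_false, if_false, PySem.Chars.upper, List.map, pvH,
      pv_two_get, pv_singleA_eq_flush]

-- Loop invariant: running B's fold from (out, pending) yields out ++ what is owed.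
theorem pv_main (cs : List Char) : ∀ (out : List String) (pending : Option Char),
    pvFinishB (cs.foldl pvStepB (out, pending)) = out ++ pvG pending cs := by
  induction cs with
  | nil =>
    intro out pending
    cases pending with
    | none => simp [pvFinishB, pvG, pvLoopA]
    | some p =>
      simp only [List.foldl, pvFinishB, pvG, pvH, pvFlushL]
      by_cases hmem : p ∈ SINGLES.toList <;> simp [hmem]
  | cons c cs ih =>
    intro out pending
    by_cases hc : PySem.Chars.isalpha c = false
    · cases pending with
      | none =>
        rw [List.foldl_cons, show pvStepB (out, none) c = (out, none) from by simp [pvStepB, hc], ih]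
        have h2 : pvLoopA (c :: cs) = pvLoopA cs := by cases cs <;> simp [pvLoopA, hc]
        simp [pvG, h2]
      | some p =>
        rw [List.foldl_cons,
          show pvStepB (out, some p) c =
            (if SINGLES.toList.contains p then out ++ [String.ofList [p]] else out, none)
            from by simp [pvStepB, hc], ih]
        have hd : DIGRAPH.get? (String.ofList [p, PySem.Chars.upperChar c]) = none := by
          rw [pv_upperChar_of_not_alpha c hc]; exact pv_dig_none p c hc
        simp only [pvG, pvH, hd, pvFlushL]
        have : pvLoopA (c :: cs) = pvLoopA cs := by
          cases cs <;> simp [pvLoopA, hc]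
        rw [this]
        by_cases hs : p ∈ SINGLES.toList <;> simp [hs]
    · rw [Bool.not_eq_false] at hc
      cases pending with
      | none =>
        rw [List.foldl_cons,
          show pvStepB (out, none) c = (out, some (PySem.Chars.upperChar c)) from by
            simp [pvStepB, hc], ih]
        simp [pvG, pv_loopA_alpha c hc]
      | some p =>
        cases hdg : DIGRAPH.get? (String.ofList [p, PySem.Chars.upperChar c]) with
        | some t =>
          rw [List.foldl_cons,
            show pvStepB (out, some p) c = (out ++ [t], none) from by simp [pvStepB, hc, hdg], ih]
          simp [pvG, pvH, hdg]
        | none =>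
          rw [List.foldl_cons,
            show pvStepB (out, some p) c =
              (if SINGLES.toList.contains p then out ++ [String.ofList [p]] else out,
               some (PySem.Chars.upperChar c)) from by simp [pvStepB, hc, hdg], ih]
          simp only [pvG, pvH, hdg, pvFlushL, pv_loopA_alpha c hc]
          by_cases hs : p ∈ SINGLES.toList <;> simp [hs]

-- ===== VERDICT (by name: the statement is the Claim_ definition above) =====
theorem tokens_to_ascii_stream_spec : Claim_equal_tokens_to_ascii_stream := by
  intro rendered _
  unfold Spec_tokens_to_ascii_stream tokens_to_ascii_stream tokens_to_ascii_stream_alt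
  rw [pv_main rendered.toList [] none]
  simp [pvG]
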